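-- pv_equiv track=rewrite | github.com/Suraj-Mohite/python-programming-practice | DSA/2D_array/Matrix_Exitpoint.py | exitPoint
-- ===== SOURCE A (Python) =====
-- def exitPoint(arr):
--     i=0
--     j=0
--     direction=0
--     while(True):
--         if direction==0:
--             while j<len(arr[0]):
--                 if arr[i][j]==1:
--                     i+=1
--                     direction+=1
--                     break
--                 j+=1
--             else:
--                 j-=1
--                 break
--
--         if direction==1:
--             while i<len(arr):
--                 if arr[i][j]==1:
--                     j-=1
--                     direction+=1
--                     break
--                 i+=1
--             else:
--                 i-=1
--                 break
--
--         if direction==2: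
--             while j>-1:
--                 if arr[i][j]==1:
--                     i-=1
--                     direction+=1
--                     break
--                 j-=1
--             else:
--                 j+=1
--                 break
--
--         if direction==3:
--             while i>-1:
--                 if arr[i][j]==1:
--                     j+=1
--                     direction=0
--                     break
--                 i-=1
--             else:
--                 i+=1
--                 break
--
--     return i,j
-- ===== SOURCE B (Python) =====
-- def exitPoint(arr):
--     dirs = [(0, 1), (1, 0), (0, -1), (-1, 0)]
--     h, w = len(arr), len(arr[0])
--     i = j = d = 0
--     while 0 <= i < h and 0 <= j < w:
--         if arr[i][j] == 1:
--             d = (d + 1) % 4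
--         i += dirs[d][0]
--         j += dirs[d][1]
--     return i - dirs[d][0], j - dirs[d][1]
-- ===== Notes on version B (the rewrite author's own statement) =====
-- stated objective: idiomatic
-- what changed: Replaces A's four copy-pasted direction-specific inner scan loops (plus an outer dispatch loop with break/else control flow) by a single while loop over state (i,j,d) driven by a 4-entry direction-vector table, stepping back one cell on exit.
-- outside the precondition, e.g. on exitPoint([[1, 0], [5]]): A returns (1, 0), B returns (1, 0)
import Mathlib
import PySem

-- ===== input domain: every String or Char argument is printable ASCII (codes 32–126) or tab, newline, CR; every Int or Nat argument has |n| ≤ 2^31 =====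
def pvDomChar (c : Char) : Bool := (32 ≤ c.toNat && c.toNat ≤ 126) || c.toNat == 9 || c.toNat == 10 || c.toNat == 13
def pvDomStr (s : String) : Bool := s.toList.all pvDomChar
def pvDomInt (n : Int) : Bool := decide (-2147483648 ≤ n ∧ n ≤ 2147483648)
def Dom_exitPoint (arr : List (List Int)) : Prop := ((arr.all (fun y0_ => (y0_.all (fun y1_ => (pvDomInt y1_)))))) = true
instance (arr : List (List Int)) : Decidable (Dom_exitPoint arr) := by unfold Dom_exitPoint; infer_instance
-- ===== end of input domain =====

-- B replaces A's four copy-pasted direction-specific scan loops by one idiomatic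
-- while loop over (i,j,d) with a 4-entry direction-vector table; same cost, no speed claim.


-- ===== PORT A =====
-- arr[i][j]; on Pre_ inputs every read the walk performs is in bounds, so getD is exact there
def aCell (arr : List (List Int)) (i j : Int) : Int :=
  (PySem.List.pyGet? ((PySem.List.pyGet? arr i).getD []) j).getD 0

-- the direction==0 inner while loop; fuel pays 1 per cell read (totality device only:
-- the walk visits at most 4*h*w distinct states, so the fuel given below never runs out;
-- on exhaustion the loop's boundary-exit value for the current direction is returned).
-- .inl = while-else fired (break out of the outer loop, final answer), .inr = turned (new state, fuel left)
def aScan0 (arr : List (List Int)) (w : Int) : Nat → Int → Int → Sum (Int × Int) (Int × Int × Nat)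
  | 0, i, j => .inl (i, j - 1)
  | f + 1, i, j =>
    if j < w then
      if aCell arr i j = 1 then .inr (i + 1, j, f) else aScan0 arr w f i (j + 1)
    else .inl (i, j - 1)

-- the direction==1 inner while loop
def aScan1 (arr : List (List Int)) (h : Int) : Nat → Int → Int → Sum (Int × Int) (Int × Int × Nat)
  | 0, i, j => .inl (i - 1, j)
  | f + 1, i, j =>
    if i < h then
      if aCell arr i j = 1 then .inr (i, j - 1, f) else aScan1 arr h f (i + 1) j
    else .inl (i - 1, j)

-- the direction==2 inner while loop
def aScan2 (arr : List (List Int)) : Nat → Int → Int → Sum (Int × Int) (Int × Int × Nat)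
  | 0, i, j => .inl (i, j + 1)
  | f + 1, i, j =>
    if j > -1 then
      if aCell arr i j = 1 then .inr (i - 1, j, f) else aScan2 arr f i (j - 1)
    else .inl (i, j + 1)

-- the direction==3 inner while loop
def aScan3 (arr : List (List Int)) : Nat → Int → Int → Sum (Int × Int) (Int × Int × Nat)
  | 0, i, j => .inl (i + 1, j)
  | f + 1, i, j =>
    if i > -1 then
      if aCell arr i j = 1 then .inr (i, j + 1, f) else aScan3 arr f (i - 1) j
    else .inl (i + 1, j)

-- termination lemmas for the outer loop (cited by decreasing_by)
theorem aScan0_fuel_lt (arr : List (List Int)) (w : Int) :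
    ∀ (fuel : Nat) (i j i' j' : Int) (f' : Nat),
      aScan0 arr w fuel i j = .inr (i', j', f') → f' < fuel := by
  intro fuel
  induction fuel with
  | zero => intro i j i' j' f' hh; simp [aScan0] at hh
  | succ f ih =>
    intro i j i' j' f' hh
    simp only [aScan0] at hh
    split at hh
    · split at hh
      · simp only [Sum.inr.injEq, Prod.mk.injEq] at hh; omega
      · exact Nat.lt_trans (ih _ _ _ _ _ hh) (Nat.lt_succ_self f)
    · simp at hh

theorem aScan1_fuel_lt (arr : List (List Int)) (h : Int) :
    ∀ (fuel : Nat) (i j i' j' : Int) (f' : Nat),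
      aScan1 arr h fuel i j = .inr (i', j', f') → f' < fuel := by
  intro fuel
  induction fuel with
  | zero => intro i j i' j' f' hh; simp [aScan1] at hh
  | succ f ih =>
    intro i j i' j' f' hh
    simp only [aScan1] at hh
    split at hh
    · split at hh
      · simp only [Sum.inr.injEq, Prod.mk.injEq] at hh; omega
      · exact Nat.lt_trans (ih _ _ _ _ _ hh) (Nat.lt_succ_self f)
    · simp at hh

theorem aScan2_fuel_lt (arr : List (List Int)) :
    ∀ (fuel : Nat) (i j i' j' : Int) (f' : Nat),
      aScan2 arr fuel i j = .inr (i', j', f') → f' < fuel := by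
  intro fuel
  induction fuel with
  | zero => intro i j i' j' f' hh; simp [aScan2] at hh
  | succ f ih =>
    intro i j i' j' f' hh
    simp only [aScan2] at hh
    split at hh
    · split at hh
      · simp only [Sum.inr.injEq, Prod.mk.injEq] at hh; omega
      · exact Nat.lt_trans (ih _ _ _ _ _ hh) (Nat.lt_succ_self f)
    · simp at hh

theorem aScan3_fuel_lt (arr : List (List Int)) :
    ∀ (fuel : Nat) (i j i' j' : Int) (f' : Nat),
      aScan3 arr fuel i j = .inr (i', j', f') → f' < fuel := by
  intro fuel
  induction fuel with
  | zero => intro i j i' j' f' hh; simp [aScan3] at hh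
  | succ f ih =>
    intro i j i' j' f' hh
    simp only [aScan3] at hh
    split at hh
    · split at hh
      · simp only [Sum.inr.injEq, Prod.mk.injEq] at hh; omega
      · exact Nat.lt_trans (ih _ _ _ _ _ hh) (Nat.lt_succ_self f)
    · simp at hh

-- A's outer while(True): dispatch on the current direction; the fall-through from one
-- 'if direction==k' block to the next is the recursive call with (d+1) % 4
def aLoop (arr : List (List Int)) (h w : Int) (fuel : Nat) (i j : Int) (d : Nat) : Int × Int :=
  match hr : (if d = 0 then aScan0 arr w fuel i j
              else if d = 1 then aScan1 arr h fuel i j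
              else if d = 2 then aScan2 arr fuel i j
              else aScan3 arr fuel i j) with
  | .inl p => p
  | .inr (i', j', f') => aLoop arr h w f' i' j' ((d + 1) % 4)
termination_by fuel
decreasing_by
  split at hr
  · exact aScan0_fuel_lt arr w fuel i j i' j' f' hr
  · split at hr
    · exact aScan1_fuel_lt arr h fuel i j i' j' f' hr
    · split at hr
      · exact aScan2_fuel_lt arr fuel i j i' j' f' hr
      · exact aScan3_fuel_lt arr fuel i j i' j' f' hr

def exitPoint (arr : List (List Int)) : Int × Int :=
  aLoop arr (arr.length : Int) ((arr.headI).length : Int)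
    (4 * arr.length * arr.headI.length + 8) 0 0 0

-- ===== PORT B =====
def bDirs : List (Int × Int) := [(0, 1), (1, 0), (0, -1), (-1, 0)]

-- arr[i][j] (same remark as for aCell: exact on Pre_ inputs)
def bCell (arr : List (List Int)) (i j : Int) : Int :=
  (PySem.List.pyGet? ((PySem.List.pyGet? arr i).getD []) j).getD 0

-- Source B's while loop, one fuel unit per iteration (totality device; never exhausted on Pre_:
-- on exhaustion it returns the step-back value for the current direction)
def bGo (arr : List (List Int)) (h w : Int) : Nat → Int → Int → Nat → Int × Int
  | 0, i, j, d => (i - (bDirs.getD d (0, 0)).1, j - (bDirs.getD d (0, 0)).2)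
  | f + 1, i, j, d =>
    if 0 ≤ i ∧ i < h ∧ 0 ≤ j ∧ j < w then
      let d' := if bCell arr i j = 1 then (d + 1) % 4 else d
      bGo arr h w f (i + (bDirs.getD d' (0, 0)).1) (j + (bDirs.getD d' (0, 0)).2) d'
    else (i - (bDirs.getD d (0, 0)).1, j - (bDirs.getD d (0, 0)).2)

def exitPoint_alt (arr : List (List Int)) : Int × Int :=
  bGo arr (arr.length : Int) ((arr.headI).length : Int)
    (4 * arr.length * arr.headI.length + 8) 0 0 0

-- ===== PRECONDITION & SPEC =====
-- Pre_ excludes the empty matrix (A raises IndexError on len(arr[0])) and matrices with a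
-- row shorter than the first row, on which A's walk may raise IndexError mid-path (on some
-- such matrices the walk happens not to reach the short part and A still returns; those are
-- excluded too, see the cite).
def Pre_exitPoint (arr : List (List Int)) : Prop :=
  arr ≠ [] ∧ ∀ r ∈ arr, (arr.headI).length ≤ r.length
instance (arr : List (List Int)) : Decidable (Pre_exitPoint arr) := by
  unfold Pre_exitPoint; infer_instance

def pvWitness_exitPoint : List (List Int) := [[0, 0, 1], [0, 1, 0], [0, 0, 0]]

def Spec_exitPoint (arr : List (List Int)) (out : Int × Int) : Prop := out = exitPoint_alt arr
instance (arr : List (List Int)) (out : Int × Int) : Decidable (Spec_exitPoint arr out) := by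
  unfold Spec_exitPoint; infer_instance

-- ===== CLAIM (what is proved, stated in full; the proofs are below) =====
def Claim_equal_exitPoint : Prop :=
  ∀ (arr : List (List Int)), Dom_exitPoint arr → Pre_exitPoint arr →
    Spec_exitPoint arr (exitPoint arr)

-- ===== LEMMAS AND PROOFS =====

-- state invariant carried by the simulation, per direction
def WInv (h w : Int) (d : Nat) (i j : Int) : Prop :=
  if d = 0 then 0 ≤ i ∧ i < h ∧ 0 ≤ j
  else if d = 1 then 0 ≤ i ∧ 0 ≤ j ∧ j < w
  else if d = 2 then 0 ≤ i ∧ i < h ∧ j < w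
  else 0 ≤ j ∧ j < w ∧ i < h

theorem cell_eq (arr : List (List Int)) (i j : Int) : aCell arr i j = bCell arr i j := rfl

-- lockstep simulation of each inner scan by bGo
theorem scan0_sim (arr : List (List Int)) (h w : Int) :
    ∀ (fuel : Nat) (i j : Int), 0 ≤ i → i < h → 0 ≤ j →
      (∀ p, aScan0 arr w fuel i j = .inl p → bGo arr h w fuel i j 0 = p) ∧
      (∀ i' j' f', aScan0 arr w fuel i j = .inr (i', j', f') →
        bGo arr h w fuel i j 0 = bGo arr h w f' i' j' 1 ∧ f' < fuel ∧ WInv h w 1 i' j') := by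
  intro fuel
  induction fuel with
  | zero =>
    intro i j hi0 hih hj0
    constructor
    · intro p hp
      simp only [aScan0, Sum.inl.injEq] at hp; subst hp
      (simp [bGo, bDirs]; try ring)
    · intro i' j' f' hp; simp [aScan0] at hp
  | succ f ih =>
    intro i j hi0 hih hj0
    by_cases hjw : j < w
    · have hbounds : (0 ≤ i ∧ i < h ∧ 0 ≤ j ∧ j < w) := ⟨hi0, hih, hj0, hjw⟩
      by_cases hc : aCell arr i j = 1
      · have hcb : bCell arr i j = 1 := cell_eq arr i j ▸ hc
        constructor
        · intro p hp; simp [aScan0, hjw, hc] at hp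
        · intro i' j' f' hp
          simp only [aScan0, if_pos hjw, if_pos hc, Sum.inr.injEq, Prod.mk.injEq] at hp
          obtain ⟨h1, h2, h3⟩ := hp
          subst h1; subst h2; subst h3
          refine ⟨?_, Nat.lt_succ_self f, ?_⟩
          · simp only [bGo, if_pos hbounds, hcb, if_pos rfl]
            norm_num [bDirs]; try ring_nf
          · simp only [WInv]; norm_num; exact ⟨by omega, hj0, hjw⟩
      · have hcb : ¬ bCell arr i j = 1 := fun hx => hc (cell_eq arr i j ▸ hx)
        have step : bGo arr h w (f + 1) i j 0 = bGo arr h w f i (j + 1) 0 := by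
          simp only [bGo, if_pos hbounds, if_neg hcb]
          norm_num [bDirs]; try ring_nf
        constructor
        · intro p hp
          simp only [aScan0, if_pos hjw, if_neg hc] at hp
          rw [step]; exact ((ih i (j + 1) hi0 hih (by omega)).1) p hp
        · intro i' j' f' hp
          simp only [aScan0, if_pos hjw, if_neg hc] at hp
          have := ((ih i (j + 1) hi0 hih (by omega)).2) i' j' f' hp
          exact ⟨step ▸ this.1, Nat.lt_trans this.2.1 (Nat.lt_succ_self f), this.2.2⟩
    · constructor
      · intro p hp
        simp only [aScan0, if_neg hjw, Sum.inl.injEq] at hp; subst hp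
        have hnb : ¬ (0 ≤ i ∧ i < h ∧ 0 ≤ j ∧ j < w) := by tauto
        (simp [bGo, if_neg hnb, bDirs]; try ring)
      · intro i' j' f' hp; simp [aScan0, if_neg hjw] at hp

theorem scan1_sim (arr : List (List Int)) (h w : Int) :
    ∀ (fuel : Nat) (i j : Int), 0 ≤ i → 0 ≤ j → j < w →
      (∀ p, aScan1 arr h fuel i j = .inl p → bGo arr h w fuel i j 1 = p) ∧
      (∀ i' j' f', aScan1 arr h fuel i j = .inr (i', j', f') →
        bGo arr h w fuel i j 1 = bGo arr h w f' i' j' 2 ∧ f' < fuel ∧ WInv h w 2 i' j') := by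
  intro fuel
  induction fuel with
  | zero =>
    intro i j hi0 hj0 hjw
    constructor
    · intro p hp
      simp only [aScan1, Sum.inl.injEq] at hp; subst hp
      (simp [bGo, bDirs]; try ring)
    · intro i' j' f' hp; simp [aScan1] at hp
  | succ f ih =>
    intro i j hi0 hj0 hjw
    by_cases hih : i < h
    · have hbounds : (0 ≤ i ∧ i < h ∧ 0 ≤ j ∧ j < w) := ⟨hi0, hih, hj0, hjw⟩
      by_cases hc : aCell arr i j = 1
      · have hcb : bCell arr i j = 1 := cell_eq arr i j ▸ hc
        constructor
        · intro p hp; simp [aScan1, hih, hc] at hp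
        · intro i' j' f' hp
          simp only [aScan1, if_pos hih, if_pos hc, Sum.inr.injEq, Prod.mk.injEq] at hp
          obtain ⟨h1, h2, h3⟩ := hp
          subst h1; subst h2; subst h3
          refine ⟨?_, Nat.lt_succ_self f, ?_⟩
          · simp only [bGo, if_pos hbounds, hcb, if_pos rfl]
            norm_num [bDirs]; try ring_nf
          · simp only [WInv]; norm_num; exact ⟨hi0, hih, by omega⟩
      · have hcb : ¬ bCell arr i j = 1 := fun hx => hc (cell_eq arr i j ▸ hx)
        have step : bGo arr h w (f + 1) i j 1 = bGo arr h w f (i + 1) j 1 := by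
          simp only [bGo, if_pos hbounds, if_neg hcb]
          norm_num [bDirs]; try ring_nf
        constructor
        · intro p hp
          simp only [aScan1, if_pos hih, if_neg hc] at hp
          rw [step]; exact ((ih (i + 1) j (by omega) hj0 hjw).1) p hp
        · intro i' j' f' hp
          simp only [aScan1, if_pos hih, if_neg hc] at hp
          have := ((ih (i + 1) j (by omega) hj0 hjw).2) i' j' f' hp
          exact ⟨step ▸ this.1, Nat.lt_trans this.2.1 (Nat.lt_succ_self f), this.2.2⟩
    · constructor
      · intro p hp
        simp only [aScan1, if_neg hih, Sum.inl.injEq] at hp; subst hp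
        have hnb : ¬ (0 ≤ i ∧ i < h ∧ 0 ≤ j ∧ j < w) := by tauto
        (simp [bGo, if_neg hnb, bDirs]; try ring)
      · intro i' j' f' hp; simp [aScan1, if_neg hih] at hp

theorem scan2_sim (arr : List (List Int)) (h w : Int) :
    ∀ (fuel : Nat) (i j : Int), 0 ≤ i → i < h → j < w →
      (∀ p, aScan2 arr fuel i j = .inl p → bGo arr h w fuel i j 2 = p) ∧
      (∀ i' j' f', aScan2 arr fuel i j = .inr (i', j', f') →
        bGo arr h w fuel i j 2 = bGo arr h w f' i' j' 3 ∧ f' < fuel ∧ WInv h w 3 i' j') := by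
  intro fuel
  induction fuel with
  | zero =>
    intro i j hi0 hih hjw
    constructor
    · intro p hp
      simp only [aScan2, Sum.inl.injEq] at hp; subst hp
      (simp [bGo, bDirs]; try ring)
    · intro i' j' f' hp; simp [aScan2] at hp
  | succ f ih =>
    intro i j hi0 hih hjw
    by_cases hj0 : j > -1
    · have hbounds : (0 ≤ i ∧ i < h ∧ 0 ≤ j ∧ j < w) := ⟨hi0, hih, by omega, hjw⟩
      by_cases hc : aCell arr i j = 1
      · have hcb : bCell arr i j = 1 := cell_eq arr i j ▸ hc
        constructor
        · intro p hp; simp [aScan2, hj0, hc] at hp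
        · intro i' j' f' hp
          simp only [aScan2, if_pos hj0, if_pos hc, Sum.inr.injEq, Prod.mk.injEq] at hp
          obtain ⟨h1, h2, h3⟩ := hp
          subst h1; subst h2; subst h3
          refine ⟨?_, Nat.lt_succ_self f, ?_⟩
          · simp only [bGo, if_pos hbounds, hcb, if_pos rfl]
            norm_num [bDirs]; try ring_nf
          · simp only [WInv]; norm_num; exact ⟨by omega, hjw, by omega⟩
      · have hcb : ¬ bCell arr i j = 1 := fun hx => hc (cell_eq arr i j ▸ hx)
        have step : bGo arr h w (f + 1) i j 2 = bGo arr h w f i (j - 1) 2 := by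
          simp only [bGo, if_pos hbounds, if_neg hcb]
          norm_num [bDirs]; try ring_nf
        constructor
        · intro p hp
          simp only [aScan2, if_pos hj0, if_neg hc] at hp
          rw [step]; exact ((ih i (j - 1) hi0 hih (by omega)).1) p hp
        · intro i' j' f' hp
          simp only [aScan2, if_pos hj0, if_neg hc] at hp
          have := ((ih i (j - 1) hi0 hih (by omega)).2) i' j' f' hp
          exact ⟨step ▸ this.1, Nat.lt_trans this.2.1 (Nat.lt_succ_self f), this.2.2⟩
    · constructor
      · intro p hp
        simp only [aScan2, if_neg hj0, Sum.inl.injEq] at hp; subst hp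
        have hnb : ¬ (0 ≤ i ∧ i < h ∧ 0 ≤ j ∧ j < w) := by omega
        (simp [bGo, if_neg hnb, bDirs]; try ring)
      · intro i' j' f' hp; simp [aScan2, if_neg hj0] at hp

theorem scan3_sim (arr : List (List Int)) (h w : Int) :
    ∀ (fuel : Nat) (i j : Int), 0 ≤ j → j < w → i < h →
      (∀ p, aScan3 arr fuel i j = .inl p → bGo arr h w fuel i j 3 = p) ∧
      (∀ i' j' f', aScan3 arr fuel i j = .inr (i', j', f') →
        bGo arr h w fuel i j 3 = bGo arr h w f' i' j' 0 ∧ f' < fuel ∧ WInv h w 0 i' j') := by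
  intro fuel
  induction fuel with
  | zero =>
    intro i j hj0 hjw hih
    constructor
    · intro p hp
      simp only [aScan3, Sum.inl.injEq] at hp; subst hp
      (simp [bGo, bDirs]; try ring)
    · intro i' j' f' hp; simp [aScan3] at hp
  | succ f ih =>
    intro i j hj0 hjw hih
    by_cases hi0 : i > -1
    · have hbounds : (0 ≤ i ∧ i < h ∧ 0 ≤ j ∧ j < w) := ⟨by omega, hih, hj0, hjw⟩
      by_cases hc : aCell arr i j = 1
      · have hcb : bCell arr i j = 1 := cell_eq arr i j ▸ hc
        constructor
        · intro p hp; simp [aScan3, hi0, hc] at hp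
        · intro i' j' f' hp
          simp only [aScan3, if_pos hi0, if_pos hc, Sum.inr.injEq, Prod.mk.injEq] at hp
          obtain ⟨h1, h2, h3⟩ := hp
          subst h1; subst h2; subst h3
          refine ⟨?_, Nat.lt_succ_self f, ?_⟩
          · simp only [bGo, if_pos hbounds, hcb, if_pos rfl]
            norm_num [bDirs]; try ring_nf
          · simp only [WInv, if_pos rfl]; exact ⟨by omega, hih, by omega⟩
      · have hcb : ¬ bCell arr i j = 1 := fun hx => hc (cell_eq arr i j ▸ hx)
        have step : bGo arr h w (f + 1) i j 3 = bGo arr h w f (i - 1) j 3 := by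
          simp only [bGo, if_pos hbounds, if_neg hcb]
          norm_num [bDirs]; try ring_nf
        constructor
        · intro p hp
          simp only [aScan3, if_pos hi0, if_neg hc] at hp
          rw [step]; exact ((ih (i - 1) j hj0 hjw (by omega)).1) p hp
        · intro i' j' f' hp
          simp only [aScan3, if_pos hi0, if_neg hc] at hp
          have := ((ih (i - 1) j hj0 hjw (by omega)).2) i' j' f' hp
          exact ⟨step ▸ this.1, Nat.lt_trans this.2.1 (Nat.lt_succ_self f), this.2.2⟩
    · constructor
      · intro p hp
        simp only [aScan3, if_neg hi0, Sum.inl.injEq] at hp; subst hp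
        have hnb : ¬ (0 ≤ i ∧ i < h ∧ 0 ≤ j ∧ j < w) := by omega
        (simp [bGo, if_neg hnb, bDirs]; try ring)
      · intro i' j' f' hp; simp [aScan3, if_neg hi0] at hp

-- main lockstep lemma: the outer dispatch loop of A equals B's single loop, same fuel
theorem loop_eq (arr : List (List Int)) (h w : Int) :
    ∀ (fuel : Nat) (i j : Int) (d : Nat), d ≤ 3 → WInv h w d i j →
      aLoop arr h w fuel i j d = bGo arr h w fuel i j d := by
  intro fuel
  induction fuel using Nat.strong_induction_on with
  | _ fuel IH =>
    intro i j d hd hinv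
    rw [aLoop]
    interval_cases d
    · have hinv0 : 0 ≤ i ∧ i < h ∧ 0 ≤ j := by simpa [WInv] using hinv
      rcases hs : aScan0 arr w fuel i j with p | ⟨i', j', f'⟩
      · exact ((scan0_sim arr h w fuel i j hinv0.1 hinv0.2.1 hinv0.2.2).1 p hs).symm
      · have := (scan0_sim arr h w fuel i j hinv0.1 hinv0.2.1 hinv0.2.2).2 i' j' f' hs
        rw [this.1]
        exact IH f' this.2.1 i' j' 1 (by norm_num) this.2.2
    · have hinv1 : 0 ≤ i ∧ 0 ≤ j ∧ j < w := by simpa [WInv] using hinv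
      rcases hs : aScan1 arr h fuel i j with p | ⟨i', j', f'⟩
      · exact ((scan1_sim arr h w fuel i j hinv1.1 hinv1.2.1 hinv1.2.2).1 p hs).symm
      · have := (scan1_sim arr h w fuel i j hinv1.1 hinv1.2.1 hinv1.2.2).2 i' j' f' hs
        rw [this.1]
        exact IH f' this.2.1 i' j' 2 (by norm_num) this.2.2
    · have hinv2 : 0 ≤ i ∧ i < h ∧ j < w := by simpa [WInv] using hinv
      rcases hs : aScan2 arr fuel i j with p | ⟨i', j', f'⟩
      · exact ((scan2_sim arr h w fuel i j hinv2.1 hinv2.2.1 hinv2.2.2).1 p hs).symm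
      · have := (scan2_sim arr h w fuel i j hinv2.1 hinv2.2.1 hinv2.2.2).2 i' j' f' hs
        rw [this.1]
        exact IH f' this.2.1 i' j' 3 (by norm_num) this.2.2
    · have hinv3 : 0 ≤ j ∧ j < w ∧ i < h := by simpa [WInv] using hinv
      rcases hs : aScan3 arr fuel i j with p | ⟨i', j', f'⟩
      · exact ((scan3_sim arr h w fuel i j hinv3.1 hinv3.2.1 hinv3.2.2).1 p hs).symm
      · have := (scan3_sim arr h w fuel i j hinv3.1 hinv3.2.1 hinv3.2.2).2 i' j' f' hs
        rw [this.1]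
        exact IH f' this.2.1 i' j' 0 (by norm_num) this.2.2

-- ===== VERDICT (by name: the statement is the Claim_ definition above) =====
theorem exitPoint_spec : Claim_equal_exitPoint := by
  intro arr _hdom hpre
  unfold Spec_exitPoint exitPoint exitPoint_alt
  apply loop_eq
  · norm_num
  · have hne : arr ≠ [] := hpre.1
    have hlen : 0 < arr.length := List.length_pos_iff.mpr hne
    simp only [WInv, if_pos rfl]
    exact ⟨le_refl 0, by exact_mod_cast hlen, le_refl 0⟩
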